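-- pv_equiv track=rewrite | github.com/nfernan1/speedreader | Google Drive/Documents/Class/2013/ICS 33/Solutions copy/inlabexam1students/Lab 1/LewDaniel/exam.py | find_influencers
-- ===== SOURCE A (Python) =====
-- from math        import ceil
--
-- def find_influencers(graph):
--     infl = {k: len(graph[k]) - ceil(len(graph[k])/2) for k in graph}
--     while True:
--         cand = []
--         for key in infl:
--             if infl[key] >= 0:
--                 cand.append(((infl[key]), (len(graph[key])), (key)))
--         if cand == []:
--             break
--         lowest = min(cand)
--         infl.pop(lowest[2])
--         for node in graph:
--             if lowest[2] in graph[node]: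
--                 if node in infl:
--                     infl[node] -= 1
--     final = [item for item in infl.keys()]
--     return set(final)
-- ===== SOURCE B (Python) =====
-- def find_influencers(graph):
--     # same greedy elimination, but with a precomputed reverse-adjacency index:
--     # removing a node decrements exactly its recorded predecessors, instead of
--     # re-scanning every adjacency list on every round.
--     infl = {k: len(v) // 2 for k, v in graph.items()}
--     rev = {}
--     for node, nbrs in graph.items():
--         for t in set(nbrs):
--             rev.setdefault(t, []).append(node)
--     while True:
--         best = None
--         for k, v in infl.items():
--             if v >= 0:
--                 t = (v, len(graph[k]), k)
--                 if best is None or t < best: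
--                     best = t
--         if best is None:
--             return set(infl)
--         del infl[best[2]]
--         for node in rev.get(best[2], ()):
--             if node in infl:
--                 infl[node] -= 1
-- ===== Notes on version B (the rewrite author's own statement) =====
-- stated objective: faster
-- what changed: B precomputes a reverse-adjacency index once, so each greedy removal decrements exactly the removed node's recorded predecessors with a single-pass min scan, instead of A's per-round rescan of every node's whole adjacency list with membership tests.
import Mathlib
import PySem

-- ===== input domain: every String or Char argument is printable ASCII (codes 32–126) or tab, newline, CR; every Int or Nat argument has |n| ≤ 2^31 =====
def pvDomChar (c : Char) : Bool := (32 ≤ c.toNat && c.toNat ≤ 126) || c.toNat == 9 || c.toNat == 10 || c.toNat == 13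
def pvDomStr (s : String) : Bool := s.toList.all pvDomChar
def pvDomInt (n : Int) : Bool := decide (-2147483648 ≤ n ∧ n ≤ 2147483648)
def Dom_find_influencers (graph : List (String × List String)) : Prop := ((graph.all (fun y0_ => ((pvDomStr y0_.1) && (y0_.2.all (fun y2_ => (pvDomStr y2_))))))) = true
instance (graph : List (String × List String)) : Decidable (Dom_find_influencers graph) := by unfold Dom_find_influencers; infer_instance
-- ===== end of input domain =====

-- B replaces A's per-round rescan of every adjacency list by a reverse-adjacency index
-- built once, so removing a node only touches its recorded predecessors (faster by the
-- timing run; same greedy elimination, same result).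

-- Python's '<' on (int, int, str) tuples: lexicographic; Lean's String '<' is the same
-- code-point lexicographic order as Python's.
def pvTupLt (a b : Int × Int × String) : Bool :=
  decide (a.1 < b.1) || (a.1 == b.1 &&
    (decide (a.2.1 < b.2.1) || (a.2.1 == b.2.1 && decide (a.2.2 < b.2.2))))

-- ===== PORT A =====
-- math.ceil(n/2); exact for the list lengths that occur (float division is exact there)
def pvCeilHalf (n : Int) : Int := -(PySem.Int.floordiv (-n) 2)

-- min(cand): first minimal element, scanning left to right
def pvMinTup (h : Int × Int × String) (t : List (Int × Int × String)) : Int × Int × String :=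
  t.foldl (fun m x => if pvTupLt x m then x else m) h

-- 'for node in graph: if lowest[2] in graph[node]: if node in infl: infl[node] -= 1'
def pvDecA (graph : PySem.Dict String (List String)) (key : String)
    (infl : PySem.Dict String Int) : PySem.Dict String Int :=
  graph.keys.foldl (fun d node =>
    if (graph.getD node []).contains key then
      (if d.contains node then d.modify node 0 (· - 1) else d)
    else d) infl

-- the 'while True' loop; fuel only makes it total: each round pops a key, so size+1 suffices
def pvLoopA (graph : PySem.Dict String (List String)) :
    Nat → PySem.Dict String Int → PySem.Dict String Int
  | 0, infl => infl
  | fuel+1, infl =>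
    let cand := infl.items.foldl (fun acc kv =>
        if kv.2 ≥ 0 then acc ++ [(kv.2, ((graph.getD kv.1 []).length : Int), kv.1)] else acc) []
    match cand with
    | [] => infl
    | c :: cs =>
      let lowest := pvMinTup c cs
      pvLoopA graph fuel (pvDecA graph lowest.2.2 (infl.erase lowest.2.2))

def find_influencers (graph : List (String × List String)) : List String :=
  let g : PySem.Dict String (List String) := PySem.Dict.mk graph
  let infl := g.keys.foldl (fun d k =>
      d.insert k (((g.getD k []).length : Int) - pvCeilHalf ((g.getD k []).length : Int)))
    PySem.Dict.empty
  let res := pvLoopA g (infl.size + 1) infl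
  PySem.Set.ofList res.keys

-- ===== PORT B =====
-- reverse adjacency: rev.setdefault(t, []).append(node) for each t in set(nbrs);
-- getD/insert models the in-place list append exactly since rev is only ever read via .get
def pvRevAdj (graph : PySem.Dict String (List String)) : PySem.Dict String (List String) :=
  graph.items.foldl (fun r kv =>
    (PySem.Set.ofList kv.2).foldl (fun r t => r.insert t (r.getD t [] ++ [kv.1])) r)
    PySem.Dict.empty

-- the single-pass 'best = None; for k, v in infl.items(): …' scan
def pvScanBest (graph : PySem.Dict String (List String)) (infl : PySem.Dict String Int) :
    Option (Int × Int × String) :=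
  infl.items.foldl (fun (best : Option (Int × Int × String)) (kv : String × Int) =>
    if kv.2 ≥ 0 then
      let t : Int × Int × String := (kv.2, ((graph.getD kv.1 []).length : Int), kv.1)
      match best with
      | none => some t
      | some m => if pvTupLt t m then some t else some m
    else best) none

def pvLoopB (graph rev : PySem.Dict String (List String)) :
    Nat → PySem.Dict String Int → PySem.Dict String Int
  | 0, infl => infl
  | fuel+1, infl =>
    match pvScanBest graph infl with
    | none => infl
    | some best =>
      pvLoopB graph rev fuel ((rev.getD best.2.2 []).foldl
        (fun d node => if d.contains node then d.modify node 0 (· - 1) else d)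
        (infl.erase best.2.2))

def find_influencers_alt (graph : List (String × List String)) : List String :=
  let g : PySem.Dict String (List String) := PySem.Dict.mk graph
  let infl := g.items.foldl (fun d kv =>
      d.insert kv.1 (PySem.Int.floordiv (kv.2.length : Int) 2)) PySem.Dict.empty
  let rev := pvRevAdj g
  let res := pvLoopB g rev (infl.size + 1) infl
  PySem.Set.ofList res.keys

-- ===== PRECONDITION & SPEC =====
-- Pre_ excludes association lists with duplicate keys: they do not represent a Python dict
-- (Python collapses duplicates last-wins when the dict is built, which the first-match
-- association-list convention does not model).
def Pre_find_influencers (graph : List (String × List String)) : Prop :=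
  (graph.map Prod.fst).Nodup
instance (graph : List (String × List String)) : Decidable (Pre_find_influencers graph) := by
  unfold Pre_find_influencers; infer_instance

def pvWitness_find_influencers : (List (String × List String)) :=
  [("a", ["b", "c"]), ("b", ["a"]), ("c", [])]

def Spec_find_influencers (graph : List (String × List String)) (out : List String) : Prop := out = find_influencers_alt graph
instance (graph : List (String × List String)) (out : List String) : Decidable (Spec_find_influencers graph out) := by unfold Spec_find_influencers; infer_instance

-- ===== CLAIM (what is proved, stated in full; the proofs are below) =====
def Claim_equal_find_influencers : Prop := ∀ (graph : List (String × List String)), Dom_find_influencers graph → Pre_find_influencers graph → Spec_find_influencers graph (find_influencers graph)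

-- ===== LEMMAS AND PROOFS =====

-- n - ceil(n/2) = n // 2
lemma pv_sub_ceilHalf (n : Int) : n - pvCeilHalf n = PySem.Int.floordiv n 2 := by
  unfold pvCeilHalf
  have h1 := PySem.Int.floordiv_mul_add_mod (-n) 2
  have h2 := PySem.Int.floordiv_mul_add_mod n 2
  have h3 : 0 ≤ PySem.Int.mod (-n) 2 := PySem.Int.mod_nonneg _ (by norm_num)
  have h4 : PySem.Int.mod (-n) 2 < 2 := PySem.Int.mod_lt _ (by norm_num)
  have h5 : 0 ≤ PySem.Int.mod n 2 := PySem.Int.mod_nonneg _ (by norm_num)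
  have h6 : PySem.Int.mod n 2 < 2 := PySem.Int.mod_lt _ (by norm_num)
  omega

-- min over a list built by appending = the left-to-right first-minimum scan
def pvMinOpt : List (Int × Int × String) → Option (Int × Int × String)
  | [] => none
  | c :: cs => some (pvMinTup c cs)

lemma pvMinOpt_snoc (acc : List (Int × Int × String)) (t : Int × Int × String) :
    pvMinOpt (acc ++ [t]) =
      (match pvMinOpt acc with
       | none => some t
       | some m => if pvTupLt t m then some t else some m) := by
  cases acc with
  | nil => rfl
  | cons c cs => simp [pvMinOpt, pvMinTup, List.foldl_append]; split <;> rfl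

lemma pv_scan_eq (g : PySem.Dict String (List String)) (l : List (String × Int))
    (acc : List (Int × Int × String)) :
    l.foldl (fun (best : Option (Int × Int × String)) (kv : String × Int) =>
        if kv.2 ≥ 0 then
          let t : Int × Int × String := (kv.2, ((g.getD kv.1 []).length : Int), kv.1)
          match best with
          | none => some t
          | some m => if pvTupLt t m then some t else some m
        else best) (pvMinOpt acc)
      = pvMinOpt (l.foldl (fun acc kv =>
          if kv.2 ≥ 0 then acc ++ [(kv.2, ((g.getD kv.1 []).length : Int), kv.1)] else acc) acc) := by
  induction l generalizing acc with
  | nil => rfl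
  | cons kv l ih =>
    simp only [List.foldl_cons]
    by_cases h : kv.2 ≥ 0
    · simp only [if_pos h]
      rw [← pvMinOpt_snoc]
      exact ih _
    · simp only [if_neg h]
      exact ih _

-- the inner 'for t in set(nbrs)' loop appends node to exactly the touched buckets
lemma pv_revInner (ts : List String) (hnd : ts.Nodup) (node : String) (x : String)
    (r : PySem.Dict String (List String)) :
    (ts.foldl (fun r t => r.insert t (r.getD t [] ++ [node])) r).getD x []
      = r.getD x [] ++ (if x ∈ ts then [node] else []) := by
  induction ts generalizing r with
  | nil => simp
  | cons t ts ih =>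
    simp only [List.nodup_cons] at hnd
    simp only [List.foldl_cons]
    rw [ih hnd.2]
    rw [PySem.Dict.getD_insert]
    by_cases hx : x = t
    · subst hx
      simp [hnd.1]
    · simp [hx]

-- the reverse-adjacency bucket of x lists, in order, the nodes whose adjacency contains x
lemma pv_revAdj_getD (L : List (String × List String)) (x : String)
    (r : PySem.Dict String (List String)) :
    (L.foldl (fun r kv =>
        (PySem.Set.ofList kv.2).foldl (fun r t => r.insert t (r.getD t [] ++ [kv.1])) r) r).getD x []
      = r.getD x [] ++ (L.filter (fun kv => kv.2.contains x)).map Prod.fst := by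
  induction L generalizing r with
  | nil => simp
  | cons kv L ih =>
    simp only [List.foldl_cons]
    rw [ih]
    rw [pv_revInner _ (PySem.Set.nodup_ofList _) _ _ _]
    by_cases hx : x ∈ kv.2
    · simp [PySem.Set.mem_ofList, hx]
    · simp [PySem.Set.mem_ofList, hx]

-- A's decrement sweep over all nodes = B's sweep over the reverse-adjacency bucket
lemma pv_dec_eq (g : PySem.Dict String (List String)) (hnd : g.keys.Nodup) (key : String)
    (infl : PySem.Dict String Int) :
    pvDecA g key infl
      = ((pvRevAdj g).getD key []).foldl
          (fun d node => if d.contains node then d.modify node 0 (· - 1) else d)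
          infl := by
  unfold pvDecA pvRevAdj
  rw [PySem.List.foldl_if_eq_foldl_filter]
  rw [pv_revAdj_getD]
  rw [PySem.Dict.getD_empty]
  simp only [List.nil_append]
  congr 1
  show (g.items.map Prod.fst).filter _ = _
  rw [List.filter_map]
  congr 1
  apply List.filter_congr
  intro kv hkv
  simp only [Function.comp_apply]
  rw [PySem.Dict.getD_of_mem_items g (by simpa using hkv) hnd]

lemma pv_loop_eq (g : PySem.Dict String (List String)) (hnd : g.keys.Nodup) :
    ∀ (fuel : Nat) (infl : PySem.Dict String Int),
      pvLoopA g fuel infl = pvLoopB g (pvRevAdj g) fuel infl := by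
  intro fuel
  induction fuel with
  | zero => intro infl; rfl
  | succ fuel ih =>
    intro infl
    have hscan : pvScanBest g infl
        = pvMinOpt (infl.items.foldl (fun acc kv =>
            if kv.2 ≥ 0 then acc ++ [(kv.2, ((g.getD kv.1 []).length : Int), kv.1)] else acc) []) :=
      pv_scan_eq g infl.items []
    cases hc : infl.items.foldl (fun acc kv =>
            if kv.2 ≥ 0 then acc ++ [(kv.2, ((g.getD kv.1 []).length : Int), kv.1)] else acc) [] with
    | nil =>
      simp only [pvLoopA, pvLoopB, hc, hscan, pvMinOpt]
    | cons c cs =>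
      simp only [pvLoopA, pvLoopB, hc, hscan, pvMinOpt]
      rw [← pv_dec_eq g hnd]
      exact ih _

lemma pv_init_eq (g : PySem.Dict String (List String)) (hnd : g.keys.Nodup) :
    g.keys.foldl (fun d k =>
        d.insert k (((g.getD k []).length : Int) - pvCeilHalf ((g.getD k []).length : Int)))
      PySem.Dict.empty
      = g.items.foldl (fun d kv =>
          d.insert kv.1 (PySem.Int.floordiv (kv.2.length : Int) 2)) PySem.Dict.empty := by
  have hk : g.keys = g.items.map Prod.fst := rfl
  rw [hk, List.foldl_map]
  apply PySem.List.foldl_congr_mem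
  intro d kv hkv
  rw [PySem.Dict.getD_of_mem_items g (by simpa using hkv) hnd, pv_sub_ceilHalf]

-- ===== VERDICT (by name: the statement is the Claim_ definition above) =====
theorem find_influencers_spec : Claim_equal_find_influencers := by
  intro graph _ hpre
  unfold Spec_find_influencers find_influencers find_influencers_alt
  have hnd : (PySem.Dict.mk graph).keys.Nodup := hpre
  dsimp only
  rw [pv_init_eq _ hnd, pv_loop_eq _ hnd]
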